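-- pv_equiv track=rewrite | github.com/MarcoYou/open-proxy-mcp | open_proxy_mcp/tools/parser.py | _normalize_financial_rows
-- ===== SOURCE A (Python) =====
-- def _normalize_financial_rows(columns: list[str], rows: list[list[str]]) -> list[list[str]]:
--     """다양한 컬럼 패턴을 [account, note, current, prior] 4컬럼으로 정규화
--
--     패턴 예시:
--     - KT&G:    [account, note, current, prior] → 그대로
--     - 삼성전자: [account, current, current_sub, prior, prior_sub] → 금액 병합
--     - LG화학:  [account, note, current, current_sub, prior, prior_sub] → 금액 병합
--     """
--     if not columns or not rows:
--         return rows
--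
--     # 이미 4컬럼이고 [account, note, current, prior]면 그대로
--     if columns == ["account", "note", "current", "prior"]:
--         return rows
--
--     # 각 역할의 인덱스 찾기
--     account_idx = None
--     note_idx = None
--     current_idxs = []
--     prior_idxs = []
--
--     for i, col in enumerate(columns):
--         if col == "account" and account_idx is None:
--             account_idx = i
--         elif col == "note":
--             note_idx = i
--         elif col in ("current", "current_sub"):
--             current_idxs.append(i)
--         elif col in ("prior", "prior_sub"):
--             prior_idxs.append(i)
--
--     if account_idx is None:
--         return rows
--
--     normalized = []
--     for row in rows:
--         account = row[account_idx] if account_idx < len(row) else ""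
--         note = row[note_idx] if note_idx is not None and note_idx < len(row) else ""
--
--         # current: 여러 컬럼 중 비어있지 않은 첫 번째 값
--         current = ""
--         for idx in current_idxs:
--             if idx < len(row) and row[idx].strip():
--                 current = row[idx]
--                 break
--
--         # prior: 여러 컬럼 중 비어있지 않은 첫 번째 값
--         prior = ""
--         for idx in prior_idxs:
--             if idx < len(row) and row[idx].strip():
--                 prior = row[idx]
--                 break
--
--         normalized.append([account, note, current, prior])
--
--     return normalized
-- ===== SOURCE B (Python) =====
-- def _normalize_financial_rows(columns: list[str], rows: list[list[str]]) -> list[list[str]]: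
--     """Single fused pass per row: classify each (column, cell) pair inline instead of
--     precomputing role indexes in a separate pass."""
--     if not columns or not rows:
--         return rows
--     if columns == ["account", "note", "current", "prior"]:
--         return rows
--     if "account" not in columns:
--         return rows
--
--     normalized = []
--     for row in rows:
--         account = note = current = prior = ""
--         seen_account = False
--         for i, col in enumerate(columns):
--             cell = row[i] if i < len(row) else ""
--             if col == "account":
--                 if not seen_account:
--                     account = cell
--                     seen_account = True
--             elif col == "note":
--                 note = cell
--             elif col in ("current", "current_sub"):
--                 if not current and cell.strip():
--                     current = cell
--             elif col in ("prior", "prior_sub"):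
--                 if not prior and cell.strip():
--                     prior = cell
--         normalized.append([account, note, current, prior])
--     return normalized
-- ===== Notes on version B (the rewrite author's own statement) =====
-- stated objective: alternative
-- what changed: Replaced A's two-phase design (a column pass collecting account/note/current/prior index lists, then per-row lookups through those lists) with a single fused per-row pass that classifies each (column, cell) pair inline, so no role-index structures are built at all.
import Mathlib
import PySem

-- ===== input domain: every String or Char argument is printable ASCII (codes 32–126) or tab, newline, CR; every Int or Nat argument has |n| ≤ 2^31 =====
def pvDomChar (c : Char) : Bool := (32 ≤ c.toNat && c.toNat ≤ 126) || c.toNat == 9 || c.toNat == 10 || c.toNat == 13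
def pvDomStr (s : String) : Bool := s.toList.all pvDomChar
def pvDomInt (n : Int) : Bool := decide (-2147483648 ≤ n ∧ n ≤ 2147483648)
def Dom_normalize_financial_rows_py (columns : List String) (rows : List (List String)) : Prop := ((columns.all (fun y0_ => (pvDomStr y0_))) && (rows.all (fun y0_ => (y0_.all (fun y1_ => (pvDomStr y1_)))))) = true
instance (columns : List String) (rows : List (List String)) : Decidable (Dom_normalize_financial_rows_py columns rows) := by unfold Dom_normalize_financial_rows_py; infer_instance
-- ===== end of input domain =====

-- B replaces A's two-phase design (collect role indexes, then per-row lookups) with one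
-- fused per-row classification pass; same result, similar cost (objective: alternative).

-- ===== PORT A =====
-- row[i] if i < len(row) else ""   (the guarded accesses A performs)
def pvCell (row : List String) (i : Nat) : String :=
  if i < row.length then row.getD i "" else ""

-- the body of A's `for i, col in enumerate(columns)` index-collecting loop
def pvAStep (i : Nat) (col : String)
    (s : Option Nat × Option Nat × List Nat × List Nat) :
    Option Nat × Option Nat × List Nat × List Nat :=
  if col = "account" ∧ s.1 = none then (some i, s.2.1, s.2.2.1, s.2.2.2)
  else if col = "note" then (s.1, some i, s.2.2.1, s.2.2.2)
  else if col = "current" ∨ col = "current_sub" then (s.1, s.2.1, s.2.2.1 ++ [i], s.2.2.2)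
  else if col = "prior" ∨ col = "prior_sub" then (s.1, s.2.1, s.2.2.1, s.2.2.2 ++ [i])
  else s

def pvAIdxLoop : List String → Nat → (Option Nat × Option Nat × List Nat × List Nat) →
    Option Nat × Option Nat × List Nat × List Nat
  | [], _, s => s
  | col :: rest, i, s => pvAIdxLoop rest (i + 1) (pvAStep i col s)

-- A's `for idx in …: if idx < len(row) and row[idx].strip(): … break` loops
def pvFirstNE (row : List String) : List Nat → String
  | [] => ""
  | i :: rest =>
      if i < row.length ∧ PySem.Str.strip (row.getD i "") ≠ "" then row.getD i ""
      else pvFirstNE row rest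

def normalize_financial_rows_py (columns : List String) (rows : List (List String)) : List (List String) :=
  if columns = [] ∨ rows = [] then rows
  else if columns = ["account", "note", "current", "prior"] then rows
  else
    let st := pvAIdxLoop columns 0 (none, none, [], [])
    match st.1 with
    | none => rows
    | some aIdx =>
        rows.map (fun row =>
          let account := pvCell row aIdx
          let note := match st.2.1 with | none => "" | some n => pvCell row n
          let current := pvFirstNE row st.2.2.1
          let prior := pvFirstNE row st.2.2.2
          [account, note, current, prior])

-- ===== PORT B =====
-- the body of B's fused per-row `for i, col in enumerate(columns)` loop
def pvRowStep (row : List String) (i : Nat) (col : String)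
    (s : String × String × String × String × Bool) :
    String × String × String × String × Bool :=
  let cell := pvCell row i
  if col = "account" then
    (if s.2.2.2.2 then s else (cell, s.2.1, s.2.2.1, s.2.2.2.1, true))
  else if col = "note" then (s.1, cell, s.2.2.1, s.2.2.2.1, s.2.2.2.2)
  else if col = "current" ∨ col = "current_sub" then
    (if s.2.2.1 = "" ∧ PySem.Str.strip cell ≠ "" then (s.1, s.2.1, cell, s.2.2.2.1, s.2.2.2.2) else s)
  else if col = "prior" ∨ col = "prior_sub" then
    (if s.2.2.2.1 = "" ∧ PySem.Str.strip cell ≠ "" then (s.1, s.2.1, s.2.2.1, cell, s.2.2.2.2) else s)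
  else s

def pvRowLoop (row : List String) : List String → Nat →
    (String × String × String × String × Bool) → String × String × String × String × Bool
  | [], _, s => s
  | col :: rest, i, s => pvRowLoop row rest (i + 1) (pvRowStep row i col s)

def normalize_financial_rows_py_alt (columns : List String) (rows : List (List String)) : List (List String) :=
  if columns = [] ∨ rows = [] then rows
  else if columns = ["account", "note", "current", "prior"] then rows
  else if ¬ ("account" ∈ columns) then rows
  else
    rows.map (fun row =>
      let st := pvRowLoop row columns 0 ("", "", "", "", false)
      [st.1, st.2.1, st.2.2.1, st.2.2.2.1])

-- ===== PRECONDITION & SPEC =====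
def Spec_normalize_financial_rows_py (columns : List String) (rows : List (List String)) (out : List (List String)) : Prop := out = normalize_financial_rows_py_alt columns rows
instance (columns : List String) (rows : List (List String)) (out : List (List String)) : Decidable (Spec_normalize_financial_rows_py columns rows out) := by unfold Spec_normalize_financial_rows_py; infer_instance

-- ===== CLAIM (what is proved, stated in full; the proofs are below) =====
def Claim_equal_normalize_financial_rows_py : Prop := ∀ (columns : List String) (rows : List (List String)), Dom_normalize_financial_rows_py columns rows → Spec_normalize_financial_rows_py columns rows (normalize_financial_rows_py columns rows)

-- ===== LEMMAS AND PROOFS =====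

-- B's per-row state, read off from A's partially collected role indexes
def pvExtract (row : List String) (s : Option Nat × Option Nat × List Nat × List Nat) :
    String × String × String × String × Bool :=
  ((match s.1 with | none => "" | some i => pvCell row i),
   (match s.2.1 with | none => "" | some i => pvCell row i),
   pvFirstNE row s.2.2.1, pvFirstNE row s.2.2.2, s.1.isSome)

theorem pvStrip_empty : PySem.Str.strip "" = "" := by decide

theorem pvFirstNE_append (row : List String) (l : List Nat) (i : Nat) :
    pvFirstNE row (l ++ [i]) =
      (if pvFirstNE row l = "" then pvFirstNE row [i] else pvFirstNE row l) := by
  induction l with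
  | nil => simp [pvFirstNE]
  | cons j rest ih =>
      by_cases hc : j < row.length ∧ PySem.Str.strip (row.getD j "") ≠ ""
      · have hv : row.getD j "" ≠ "" := fun e => hc.2 (by rw [e]; exact pvStrip_empty)
        rw [List.cons_append, pvFirstNE, if_pos hc, pvFirstNE, if_pos hc, if_neg hv]
      · rw [List.cons_append, pvFirstNE, if_neg hc, pvFirstNE, if_neg hc, ih]

theorem pvFirstNE_single (row : List String) (i : Nat) :
    pvFirstNE row [i] =
      (if PySem.Str.strip (pvCell row i) = "" then "" else pvCell row i) := by
  by_cases hlt : i < row.length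
  · rw [pvFirstNE, pvFirstNE, pvCell, if_pos hlt]
    by_cases hs : PySem.Str.strip (row.getD i "") = ""
    · have hneg : ¬ (i < row.length ∧ PySem.Str.strip (row.getD i "") ≠ "") := fun h => h.2 hs
      rw [if_pos hs, if_neg hneg]
    · rw [if_neg hs, if_pos ⟨hlt, hs⟩]
  · have hneg : ¬ (i < row.length ∧ PySem.Str.strip (row.getD i "") ≠ "") := fun h => hlt h.1
    rw [pvFirstNE, pvFirstNE, pvCell, if_neg hlt, if_pos pvStrip_empty, if_neg hneg]

theorem pvStep_comm (row : List String) (i : Nat) (col : String)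
    (s : Option Nat × Option Nat × List Nat × List Nat) :
    pvRowStep row i col (pvExtract row s) = pvExtract row (pvAStep i col s) := by
  obtain ⟨aIdx, nIdx, cIdxs, pIdxs⟩ := s
  by_cases h1 : col = "account"
  · cases aIdx with
    | none => simp [pvRowStep, pvAStep, pvExtract, h1]
    | some a => simp [pvRowStep, pvAStep, pvExtract, h1]
  · by_cases h2 : col = "note"
    · simp [pvRowStep, pvAStep, pvExtract, h2]
    · by_cases h3 : col = "current" ∨ col = "current_sub"
      · simp only [pvRowStep, pvAStep, pvExtract, h1, h2, h3, if_true, if_false, false_and]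
        rw [pvFirstNE_append, pvFirstNE_single]
        split_ifs <;> first | rfl | simp_all
      · by_cases h4 : col = "prior" ∨ col = "prior_sub"
        · simp only [pvRowStep, pvAStep, pvExtract, h1, h2, h3, h4, if_true, if_false, false_and]
          rw [pvFirstNE_append, pvFirstNE_single]
          split_ifs <;> first | rfl | simp_all
        · simp [pvRowStep, pvAStep, pvExtract, h1, h2, h3, h4]

theorem pvLoop_sim (row : List String) :
    ∀ (cols : List String) (i : Nat) (s : Option Nat × Option Nat × List Nat × List Nat),
      pvRowLoop row cols i (pvExtract row s) = pvExtract row (pvAIdxLoop cols i s) := by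
  intro cols
  induction cols with
  | nil => intro i s; rfl
  | cons col rest ih =>
      intro i s
      simp only [pvRowLoop, pvAIdxLoop, pvStep_comm]
      exact ih _ _

theorem pvAIdx_none :
    ∀ (cols : List String) (i : Nat) (s : Option Nat × Option Nat × List Nat × List Nat),
      (pvAIdxLoop cols i s).1 = none ↔ s.1 = none ∧ "account" ∉ cols := by
  intro cols
  induction cols with
  | nil => intro i s; simp [pvAIdxLoop]
  | cons col rest ih =>
      intro i s
      rw [pvAIdxLoop, ih]
      have hstep : (pvAStep i col s).1 = none ↔ s.1 = none ∧ ¬ col = "account" := by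
        unfold pvAStep
        split_ifs with c1 c2 c3 c4 <;> simp_all <;> tauto
      rw [hstep]
      simp [List.mem_cons, eq_comm (a := col)]
      tauto

-- ===== VERDICT (by name: the statement is the Claim_ definition above) =====
theorem normalize_financial_rows_py_spec : Claim_equal_normalize_financial_rows_py := by
  intro columns rows _
  unfold Spec_normalize_financial_rows_py normalize_financial_rows_py normalize_financial_rows_py_alt
  by_cases h0 : columns = [] ∨ rows = []
  · simp [h0]
  · simp only [h0, if_false]
    by_cases h1 : columns = ["account", "note", "current", "prior"]
    · simp [h1]
    · simp only [h1, if_false]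
      rcases hA : (pvAIdxLoop columns 0 (none, none, [], [])).1 with _ | aIdx
      · -- no account column: both return rows
        have hmem : "account" ∉ columns := ((pvAIdx_none columns 0 _).1 hA).2
        simp [hmem]
      · have hmem : "account" ∈ columns := by
          by_contra hnot
          have := (pvAIdx_none columns 0 (none, none, [], [])).2 ⟨rfl, hnot⟩
          rw [hA] at this; cases this
        simp only [hmem, not_true, if_false]
        apply List.map_congr_left
        intro row _
        have hsim := pvLoop_sim row columns 0 (none, none, [], [])
        have hinit : pvExtract row ((none, none, [], []) :
            Option Nat × Option Nat × List Nat × List Nat) = ("", "", "", "", false) := by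
          simp [pvExtract, pvFirstNE]
        rw [hinit] at hsim
        rw [hsim]
        simp [pvExtract, hA]
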